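-- pv_equiv track=rewrite | github.com/Adversarian/PSO-2DBP | utils/pso.py | can_place_in_bin
-- ===== SOURCE A (Python) =====
-- def can_place_in_bin(bin, w, h, bin_width, bin_height):
--     for x in range(bin_width - w + 1):
--         for y in range(bin_height - h + 1):
--             if all(
--                 x + w <= bin_x
--                 or x >= bin_x + bin_w
--                 or y + h <= bin_y
--                 or y >= bin_y + bin_h
--                 for bin_x, bin_y, bin_w, bin_h in bin
--             ):
--                 return True
--     return False
-- ===== SOURCE B (Python) =====
-- def can_place_in_bin(bin, w, h, bin_width, bin_height):
--     max_x = bin_width - w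
--     max_y = bin_height - h
--     if max_x < 0 or max_y < 0:
--         return False
--     # candidate bottom-left coordinates: 0 and the right/top edges of placed rects
--     xs = [0] + [bx + bw for bx, _, bw, _ in bin if 0 <= bx + bw <= max_x]
--     ys = [0] + [by + bh for _, by, _, bh in bin if 0 <= by + bh <= max_y]
--     return any(
--         all(x + w <= bx or x >= bx + bw or y + h <= by or y >= by + bh
--             for bx, by, bw, bh in bin)
--         for x in xs for y in ys)
-- ===== Notes on version B (the rewrite author's own statement) =====
-- stated objective: faster
-- what changed: A scans every grid position x in 0..W-w, y in 0..H-h (O(W*H*N)); B tests only candidate bottom-left points: x from {0} union right edges of placed rects, y from {0} union top edges, clamped to range (O(N^3)), justified by pushing any feasible placement left/down to such a candidate.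
import Mathlib
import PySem

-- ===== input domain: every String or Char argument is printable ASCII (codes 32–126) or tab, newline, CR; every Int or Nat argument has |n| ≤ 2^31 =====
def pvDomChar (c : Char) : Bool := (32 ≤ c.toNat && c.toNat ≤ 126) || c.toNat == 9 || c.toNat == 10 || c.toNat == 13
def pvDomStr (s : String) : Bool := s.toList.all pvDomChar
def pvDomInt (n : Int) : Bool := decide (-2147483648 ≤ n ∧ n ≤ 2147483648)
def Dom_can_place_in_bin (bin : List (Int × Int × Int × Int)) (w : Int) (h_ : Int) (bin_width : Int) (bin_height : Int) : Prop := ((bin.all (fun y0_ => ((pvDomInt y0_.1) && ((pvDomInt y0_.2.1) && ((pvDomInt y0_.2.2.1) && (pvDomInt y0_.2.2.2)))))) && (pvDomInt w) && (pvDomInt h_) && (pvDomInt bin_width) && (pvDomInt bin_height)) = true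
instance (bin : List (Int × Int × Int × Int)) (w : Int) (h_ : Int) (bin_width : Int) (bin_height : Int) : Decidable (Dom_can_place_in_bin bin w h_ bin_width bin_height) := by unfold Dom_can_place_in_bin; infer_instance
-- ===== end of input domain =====

-- B replaces A's scan of every grid position (O(W·H·N)) with the classical candidate-point
-- argument: only x ∈ {0} ∪ {right edges}, y ∈ {0} ∪ {top edges} need testing (O(N³)).

-- ===== PORT A =====
-- A's nested 'for … in range(…)' with early 'return True', ported as counted loops
-- (the count is the range's length; Python's range is lazy, so the list is never built).
def pvLoopY (bin : List (Int × Int × Int × Int)) (w h_ x y : Int) : Nat → Bool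
  | 0 => false
  | Nat.succ f =>
    if bin.all (fun r =>
        decide (x + w ≤ r.1) || decide (x ≥ r.1 + r.2.2.1) ||
        decide (y + h_ ≤ r.2.1) || decide (y ≥ r.2.1 + r.2.2.2)) then true
    else pvLoopY bin w h_ x (y + 1) f

def pvLoopX (bin : List (Int × Int × Int × Int)) (w h_ bin_height x : Int) : Nat → Bool
  | 0 => false
  | Nat.succ f =>
    if pvLoopY bin w h_ x 0 (bin_height - h_ + 1).toNat then true
    else pvLoopX bin w h_ bin_height (x + 1) f

def can_place_in_bin (bin : List (Int × Int × Int × Int)) (w : Int) (h_ : Int) (bin_width : Int) (bin_height : Int) : Bool :=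
  pvLoopX bin w h_ bin_height 0 (bin_width - w + 1).toNat

-- ===== PORT B =====
def can_place_in_bin_alt (bin : List (Int × Int × Int × Int)) (w : Int) (h_ : Int) (bin_width : Int) (bin_height : Int) : Bool :=
  let maxX := bin_width - w
  let maxY := bin_height - h_
  if maxX < 0 || maxY < 0 then false
  else
    let xs := 0 :: ((bin.filter (fun r => decide (0 ≤ r.1 + r.2.2.1) && decide (r.1 + r.2.2.1 ≤ maxX))).map (fun r => r.1 + r.2.2.1))
    let ys := 0 :: ((bin.filter (fun r => decide (0 ≤ r.2.1 + r.2.2.2) && decide (r.2.1 + r.2.2.2 ≤ maxY))).map (fun r => r.2.1 + r.2.2.2))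
    xs.any (fun x => ys.any (fun y =>
      bin.all (fun r =>
        decide (x + w ≤ r.1) || decide (x ≥ r.1 + r.2.2.1) ||
        decide (y + h_ ≤ r.2.1) || decide (y ≥ r.2.1 + r.2.2.2))))

-- ===== PRECONDITION & SPEC =====
def Spec_can_place_in_bin (bin : List (Int × Int × Int × Int)) (w : Int) (h_ : Int) (bin_width : Int) (bin_height : Int) (out : Bool) : Prop := out = can_place_in_bin_alt bin w h_ bin_width bin_height
instance (bin : List (Int × Int × Int × Int)) (w : Int) (h_ : Int) (bin_width : Int) (bin_height : Int) (out : Bool) : Decidable (Spec_can_place_in_bin bin w h_ bin_width bin_height out) := by unfold Spec_can_place_in_bin; infer_instance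

-- ===== CLAIM (what is proved, stated in full; the proofs are below) =====
def Claim_equal_can_place_in_bin : Prop := ∀ (bin : List (Int × Int × Int × Int)) (w : Int) (h_ : Int) (bin_width : Int) (bin_height : Int), Dom_can_place_in_bin bin w h_ bin_width bin_height → Spec_can_place_in_bin bin w h_ bin_width bin_height (can_place_in_bin bin w h_ bin_width bin_height)

-- ===== LEMMAS AND PROOFS =====

-- Prop-level feasibility of placing the w×h_ rectangle at (x, y).
def pvFeas (bin : List (Int × Int × Int × Int)) (w h_ x y : Int) : Prop :=
  ∀ r ∈ bin, x + w ≤ r.1 ∨ x ≥ r.1 + r.2.2.1 ∨ y + h_ ≤ r.2.1 ∨ y ≥ r.2.1 + r.2.2.2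

lemma pvFeas_push_x (bin : List (Int × Int × Int × Int)) (w h_ maxX y : Int) :
    ∀ n : Nat, (n : Int) ≤ maxX → pvFeas bin w h_ (n : Int) y →
    ∃ x', (x' = 0 ∨ ∃ r ∈ bin, x' = r.1 + r.2.2.1 ∧ 0 ≤ x' ∧ x' ≤ maxX) ∧ pvFeas bin w h_ x' y := by
  intro n
  induction n with
  | zero => intro _ hf; exact ⟨0, Or.inl rfl, hf⟩
  | succ n ih =>
    intro hle hf
    by_cases hc : ∃ r ∈ bin, ((n : Int) + 1) = r.1 + r.2.2.1
    · obtain ⟨r, hr, hx⟩ := hc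
      refine ⟨(n : Int) + 1, Or.inr ⟨r, hr, hx, by positivity, ?_⟩, ?_⟩
      · exact_mod_cast hle
      · intro s hs; have := hf s hs; push_cast at this ⊢; omega
    · push_neg at hc
      have hf' : pvFeas bin w h_ (n : Int) y := by
        intro s hs
        have h1 := hf s hs
        have h2 := hc s hs
        push_cast at h1 ⊢
        omega
      exact ih (by push_cast at hle ⊢; omega) hf'

lemma pvFeas_push_y (bin : List (Int × Int × Int × Int)) (w h_ maxY x : Int) :
    ∀ n : Nat, (n : Int) ≤ maxY → pvFeas bin w h_ x (n : Int) →
    ∃ y', (y' = 0 ∨ ∃ r ∈ bin, y' = r.2.1 + r.2.2.2 ∧ 0 ≤ y' ∧ y' ≤ maxY) ∧ pvFeas bin w h_ x y' := by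
  intro n
  induction n with
  | zero => intro _ hf; exact ⟨0, Or.inl rfl, hf⟩
  | succ n ih =>
    intro hle hf
    by_cases hc : ∃ r ∈ bin, ((n : Int) + 1) = r.2.1 + r.2.2.2
    · obtain ⟨r, hr, hy⟩ := hc
      refine ⟨(n : Int) + 1, Or.inr ⟨r, hr, hy, by positivity, ?_⟩, ?_⟩
      · exact_mod_cast hle
      · intro s hs; have := hf s hs; push_cast at this ⊢; omega
    · push_neg at hc
      have hf' : pvFeas bin w h_ x (n : Int) := by
        intro s hs
        have h1 := hf s hs
        have h2 := hc s hs
        push_cast at h1 ⊢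
        omega
      exact ih (by push_cast at hle ⊢; omega) hf'

lemma pvFeas_bool (bin : List (Int × Int × Int × Int)) (w h_ x y : Int) :
    (bin.all (fun r =>
        decide (x + w ≤ r.1) || decide (x ≥ r.1 + r.2.2.1) ||
        decide (y + h_ ≤ r.2.1) || decide (y ≥ r.2.1 + r.2.2.2)) = true) ↔ pvFeas bin w h_ x y := by
  simp only [List.all_eq_true, decide_eq_true_eq, Bool.or_eq_true, pvFeas, ge_iff_le, or_assoc,
    Prod.forall]

lemma pvLoopY_iff (bin : List (Int × Int × Int × Int)) (w h_ x : Int) :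
    ∀ (fuel : Nat) (y : Int), pvLoopY bin w h_ x y fuel = true ↔
      ∃ k : Nat, k < fuel ∧ pvFeas bin w h_ x (y + k) := by
  intro fuel
  induction fuel with
  | zero => intro y; simp [pvLoopY]
  | succ f ih =>
    intro y
    by_cases hf : pvFeas bin w h_ x y
    · rw [pvLoopY, if_pos ((pvFeas_bool bin w h_ x y).mpr hf)]
      simp only [true_iff]
      exact ⟨0, Nat.succ_pos f, by simpa using hf⟩
    · rw [pvLoopY, if_neg (fun hb => hf ((pvFeas_bool bin w h_ x y).mp hb)), ih (y + 1)]
      constructor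
      · rintro ⟨k, hk, h⟩
        exact ⟨k + 1, by omega, by have : y + 1 + (k : Int) = y + ((k : Nat) + 1 : Nat) := by push_cast; ring
                                   rwa [this] at h⟩
      · rintro ⟨k, hk, h⟩
        match k with
        | 0 => exact absurd (by simpa using h) hf
        | Nat.succ j =>
          exact ⟨j, by omega, by have : y + ((j + 1 : Nat) : Int) = y + 1 + (j : Int) := by push_cast; ring
                                 rwa [this] at h⟩

lemma pvLoopX_iff (bin : List (Int × Int × Int × Int)) (w h_ bin_height : Int) :
    ∀ (fuel : Nat) (x : Int), pvLoopX bin w h_ bin_height x fuel = true ↔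
      ∃ k : Nat, k < fuel ∧ ∃ j : Nat, j < (bin_height - h_ + 1).toNat ∧
        pvFeas bin w h_ (x + k) ((0 : Int) + j) := by
  intro fuel
  induction fuel with
  | zero => intro x; simp [pvLoopX]
  | succ f ih =>
    intro x
    by_cases hy : pvLoopY bin w h_ x 0 (bin_height - h_ + 1).toNat = true
    · rw [pvLoopX, if_pos hy]
      simp only [true_iff]
      obtain ⟨j, hj, hf⟩ := (pvLoopY_iff bin w h_ x _ 0).mp hy
      exact ⟨0, Nat.succ_pos f, j, hj, by simpa using hf⟩
    · rw [pvLoopX, if_neg hy, ih (x + 1)]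
      constructor
      · rintro ⟨k, hk, j, hj, h⟩
        refine ⟨k + 1, by omega, j, hj, ?_⟩
        have : x + 1 + (k : Int) = x + ((k : Nat) + 1 : Nat) := by push_cast; ring
        rwa [this] at h
      · rintro ⟨k, hk, j, hj, h⟩
        match k with
        | 0 =>
          exact absurd ((pvLoopY_iff bin w h_ x _ 0).mpr ⟨j, hj, by simpa using h⟩) hy
        | Nat.succ i =>
          refine ⟨i, by omega, j, hj, ?_⟩
          have : x + ((i + 1 : Nat) : Int) = x + 1 + (i : Int) := by push_cast; ring
          rwa [this] at h

lemma can_place_iff (bin : List (Int × Int × Int × Int)) (w h_ bin_width bin_height : Int) :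
    can_place_in_bin bin w h_ bin_width bin_height = true ↔
    ∃ x, (0 ≤ x ∧ x ≤ bin_width - w) ∧ ∃ y, (0 ≤ y ∧ y ≤ bin_height - h_) ∧ pvFeas bin w h_ x y := by
  rw [can_place_in_bin, pvLoopX_iff]
  constructor
  · rintro ⟨k, hk, j, hj, hf⟩
    exact ⟨(k : Int), ⟨by positivity, by omega⟩, (j : Int), ⟨by positivity, by omega⟩, by simpa using hf⟩
  · rintro ⟨x, ⟨hx0, hx1⟩, y, ⟨hy0, hy1⟩, hf⟩
    refine ⟨x.toNat, by omega, y.toNat, by omega, ?_⟩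
    have e1 : (0 : Int) + (x.toNat : Int) = x := by omega
    have e2 : (0 : Int) + (y.toNat : Int) = y := by omega
    rwa [e1, e2]

lemma can_place_alt_iff (bin : List (Int × Int × Int × Int)) (w h_ bin_width bin_height : Int)
    (h1 : 0 ≤ bin_width - w) (h2 : 0 ≤ bin_height - h_) :
    can_place_in_bin_alt bin w h_ bin_width bin_height = true ↔
    ∃ x, (x = 0 ∨ ∃ r ∈ bin, x = r.1 + r.2.2.1 ∧ 0 ≤ x ∧ x ≤ bin_width - w) ∧
      ∃ y, (y = 0 ∨ ∃ r ∈ bin, y = r.2.1 + r.2.2.2 ∧ 0 ≤ y ∧ y ≤ bin_height - h_) ∧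
        pvFeas bin w h_ x y := by
  rw [can_place_in_bin_alt, if_neg (by simpa using (by omega : ¬(bin_width - w < 0 ∨ bin_height - h_ < 0)))]
  simp only [List.any_eq_true, List.mem_cons, List.mem_map, List.mem_filter, pvFeas_bool,
    Bool.and_eq_true, decide_eq_true_eq]
  constructor
  · rintro ⟨x, hx, y, hy, hf⟩
    refine ⟨x, ?_, y, ?_, hf⟩
    · rcases hx with h | ⟨r, ⟨hr, h0, h1⟩, he⟩
      · exact Or.inl h
      · exact Or.inr ⟨r, hr, he.symm, he ▸ h0, he ▸ h1⟩
    · rcases hy with h | ⟨r, ⟨hr, h0, h1⟩, he⟩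
      · exact Or.inl h
      · exact Or.inr ⟨r, hr, he.symm, he ▸ h0, he ▸ h1⟩
  · rintro ⟨x, hx, y, hy, hf⟩
    refine ⟨x, ?_, y, ?_, hf⟩
    · rcases hx with h | ⟨r, hr, he, h0, h1⟩
      · exact Or.inl h
      · exact Or.inr ⟨r, ⟨hr, he ▸ h0, he ▸ h1⟩, he.symm⟩
    · rcases hy with h | ⟨r, hr, he, h0, h1⟩
      · exact Or.inl h
      · exact Or.inr ⟨r, ⟨hr, he ▸ h0, he ▸ h1⟩, he.symm⟩

-- ===== VERDICT (by name: the statement is the Claim_ definition above) =====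
theorem can_place_in_bin_spec : Claim_equal_can_place_in_bin := by
  intro bin w h_ bin_width bin_height _
  unfold Spec_can_place_in_bin
  rw [Bool.eq_iff_iff, can_place_iff]
  constructor
  · rintro ⟨x, ⟨hx0, hx1⟩, y, ⟨hy0, hy1⟩, hf⟩
    have h1 : (0:Int) ≤ bin_width - w := le_trans hx0 hx1
    have h2 : (0:Int) ≤ bin_height - h_ := le_trans hy0 hy1
    rw [can_place_alt_iff bin w h_ bin_width bin_height h1 h2]
    -- push x down to a candidate, then y
    obtain ⟨x', hx', hfx⟩ := pvFeas_push_x bin w h_ (bin_width - w) y x.toNat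
      (by rw [Int.toNat_of_nonneg hx0]; exact hx1)
      (by rw [Int.toNat_of_nonneg hx0]; exact hf)
    obtain ⟨y', hy', hfy⟩ := pvFeas_push_y bin w h_ (bin_height - h_) x' y.toNat
      (by rw [Int.toNat_of_nonneg hy0]; exact hy1)
      (by rw [Int.toNat_of_nonneg hy0]; exact hfx)
    exact ⟨x', hx', y', hy', hfy⟩
  · intro hb
    have hguard : ¬(bin_width - w < 0 ∨ bin_height - h_ < 0) := by
      by_contra h
      simp only [can_place_in_bin_alt] at hb
      rw [if_pos (by simpa using h)] at hb
      exact Bool.false_ne_true hb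
    push_neg at hguard
    rw [can_place_alt_iff bin w h_ bin_width bin_height (by omega) (by omega)] at hb
    obtain ⟨x, hx, y, hy, hf⟩ := hb
    refine ⟨x, ?_, y, ?_, hf⟩
    · rcases hx with h | ⟨r, _, _, h0, h1⟩
      · subst h; omega
      · exact ⟨h0, h1⟩
    · rcases hy with h | ⟨r, _, _, h0, h1⟩
      · subst h; omega
      · exact ⟨h0, h1⟩
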